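-- pv_equiv track=rewrite | github.com/itdinesh/lotapp-prod | pattern_engine_cust.py | last3_trend
-- ===== SOURCE A (Python) =====
-- def last3_trend(rows):
--     diffs = [r["diffA"] for r in rows if r["diffA"] is not None]
--
--     if len(diffs) == 0:
--         return None
--
--     if len(diffs) == 1:
--         return [diffs[0], diffs[0], diffs[0]]
--
--     if len(diffs) == 2:
--         return [diffs[0], diffs[1], diffs[1]]
--
--     return diffs[-3:]
-- ===== SOURCE B (Python) =====
-- def last3_trend(rows):
--     buf = []
--     for r in reversed(rows):
--         v = r["diffA"]
--         if v is not None: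
--             buf.append(v)
--             if len(buf) == 3:
--                 break
--     if not buf:
--         return None
--     buf.reverse()
--     while len(buf) < 3:
--         buf.append(buf[-1])
--     return buf
-- ===== Notes on version B (the rewrite author's own statement) =====
-- stated objective: alternative
-- what changed: Instead of materialising the full list of non-null diffs and branching on its length, B walks the rows backwards, stops as soon as three non-null diffA values are collected, reverses the buffer and pads it by repeating its last value.
import Mathlib
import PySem

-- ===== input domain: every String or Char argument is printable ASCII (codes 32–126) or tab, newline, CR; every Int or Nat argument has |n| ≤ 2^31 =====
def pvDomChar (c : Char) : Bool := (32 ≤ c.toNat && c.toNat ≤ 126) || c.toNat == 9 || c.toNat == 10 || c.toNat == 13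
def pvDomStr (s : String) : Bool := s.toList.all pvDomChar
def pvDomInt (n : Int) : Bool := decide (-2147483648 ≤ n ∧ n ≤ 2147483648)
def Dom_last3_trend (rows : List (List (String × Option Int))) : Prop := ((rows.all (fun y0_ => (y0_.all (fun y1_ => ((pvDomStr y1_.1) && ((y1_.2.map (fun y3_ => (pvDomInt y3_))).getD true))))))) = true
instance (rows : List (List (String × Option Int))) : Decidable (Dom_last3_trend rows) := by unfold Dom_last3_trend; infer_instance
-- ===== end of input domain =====

-- B walks the rows from the end and stops after three non-null values, instead of
-- materialising all non-null diffs first; then pads by repeating the last value.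
-- A mutates nothing observable; equivalence is about the return value.

-- ===== PORT A =====
-- r["diffA"]: first-match lookup in the association list (Python dict access).
def pvGetDiffA (r : List (String × Option Int)) : Option (Option Int) :=
  List.lookup "diffA" r

def last3_trend (rows : List (List (String × Option Int))) : Option (List Int) :=
  -- diffs = [r["diffA"] for r in rows if r["diffA"] is not None]  (Pre_ ensures the key exists)
  let diffs : List Int := rows.filterMap (fun r => (pvGetDiffA r).join)
  match diffs with
  | [] => none                               -- len(diffs) == 0
  | [d] => some [d, d, d]                    -- len(diffs) == 1
  | [d0, d1] => some [d0, d1, d1]            -- len(diffs) == 2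
  | _ => some (PySem.List.slice diffs (some (-3)) none)   -- diffs[-3:]

-- ===== PORT B =====
-- the reversed-rows loop with 'break' once the buffer has 3 entries
def pvCollect3 : List (List (String × Option Int)) → List Int → List Int
  | [], buf => buf
  | r :: rest, buf =>
    match (pvGetDiffA r).join with
    | some v =>
      if (buf ++ [v]).length == 3 then buf ++ [v]        -- break
      else pvCollect3 rest (buf ++ [v])
    | none => pvCollect3 rest buf

-- the 'while len(buf) < 3: buf.append(buf[-1])' loop (runs at most twice; fuel 3).
-- buf[-1] via pyGet?: the 'none' branch mirrors Python's IndexError path, never reached here.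
def pvPad3 : Nat → List Int → List Int
  | 0, buf => buf
  | n + 1, buf =>
    if buf.length < 3 then
      match PySem.List.pyGet? buf (-1) with
      | some x => pvPad3 n (buf ++ [x])
      | none => buf
    else buf

def last3_trend_alt (rows : List (List (String × Option Int))) : Option (List Int) :=
  let buf := pvCollect3 rows.reverse []
  if buf.isEmpty then none
  else some (pvPad3 3 buf.reverse)

-- ===== PRECONDITION & SPEC =====
-- Pre_ excludes rows missing the "diffA" key, on which A raises KeyError.
def Pre_last3_trend (rows : List (List (String × Option Int))) : Prop :=
  (rows.all (fun r => (List.lookup "diffA" r).isSome)) = true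
instance (rows : List (List (String × Option Int))) : Decidable (Pre_last3_trend rows) := by unfold Pre_last3_trend; infer_instance

def pvWitness_last3_trend : (List (List (String × Option Int))) := [[("diffA", some 1)], [("diffA", none)]]

def Spec_last3_trend (rows : List (List (String × Option Int))) (out : Option (List Int)) : Prop := out = last3_trend_alt rows
instance (rows : List (List (String × Option Int))) (out : Option (List Int)) : Decidable (Spec_last3_trend rows out) := by unfold Spec_last3_trend; infer_instance

-- ===== CLAIM (what is proved, stated in full; the proofs are below) =====
def Claim_equal_last3_trend : Prop := ∀ (rows : List (List (String × Option Int))), Dom_last3_trend rows → Pre_last3_trend rows → Spec_last3_trend rows (last3_trend rows)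

-- ===== LEMMAS AND PROOFS =====

-- the collecting loop takes the first (3 - |buf|) non-null diffs of its input
theorem pvCollect3_eq (l : List (List (String × Option Int))) :
    ∀ buf : List Int, buf.length < 3 →
      pvCollect3 l buf = buf ++ (l.filterMap (fun r => (pvGetDiffA r).join)).take (3 - buf.length) := by
  induction l with
  | nil => intro buf _; simp [pvCollect3]
  | cons r rest ih =>
    intro buf hlt
    cases h : (pvGetDiffA r).join with
    | none => simp [pvCollect3, h, ih buf hlt]
    | some v =>
      by_cases h3 : buf.length + 1 = 3
      · simp [pvCollect3, h, h3]
        have : 3 - buf.length = 1 := by omega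
        simp [this]
      · have hlt' : (buf ++ [v]).length < 3 := by simp; omega
        simp only [pvCollect3, h]
        rw [if_neg (by simp; omega), ih _ hlt']
        have h4 : 3 - buf.length = (3 - (buf.length + 1)) + 1 := by omega
        simp [h4, h]

theorem rev_take_rev (l : List Int) (n : Nat) :
    (l.reverse.take n).reverse = l.drop (l.length - n) := by
  rw [List.take_reverse, List.reverse_reverse]

theorem pvPad3_full (buf : List Int) (h : buf.length = 3) : pvPad3 3 buf = buf := by
  unfold pvPad3; rw [if_neg (by omega)]

-- ===== VERDICT (by name: the statement is the Claim_ definition above) =====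
theorem last3_trend_spec : Claim_equal_last3_trend := by
  intro rows _ _
  unfold Spec_last3_trend last3_trend last3_trend_alt
  rw [pvCollect3_eq _ [] (by simp)]
  simp only [List.nil_append, List.length_nil, Nat.sub_zero,
    List.filterMap_reverse]
  set diffs := rows.filterMap (fun r => (pvGetDiffA r).join) with hd
  rw [show (diffs.reverse.take 3).isEmpty = diffs.isEmpty by
        cases diffs <;> simp]
  match diffs with
  | [] => simp
  | [d] => simp [pvPad3, PySem.List.pyGet?, PySem.List.pyIdx?]
  | [d0, d1] => simp [pvPad3, PySem.List.pyGet?, PySem.List.pyIdx?]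
  | d0 :: d1 :: d2 :: rest =>
    rw [rev_take_rev]
    rw [PySem.List.slice_from_neg_ofNat _ 3 (by omega)]
    rw [pvPad3_full _ (by simp; omega)]
    simp
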